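-- pv_equiv track=rewrite | github.com/pr4nshul/CFC-Python-DSA-March | Kartik_Behl/Assignment_4.py | replace_duplicate_consequtive
-- ===== SOURCE A (Python) =====
-- def replace_duplicate_consequtive(st,index=0,prev="",result=""):
--     if index == len(st):
--         return result
--
--     if prev == st[index]:
--         result += "-"
--     result += st[index]
--     prev = st[index]
--     return replace_duplicate_consequtive(st,index+1,prev,result)
-- ===== SOURCE B (Python) =====
-- def replace_duplicate_consequtive(st, index=0, prev="", result=""):
--     for i in range(index, len(st)):
--         c = st[i]
--         if prev == c:
--             result += "-"
--         result += c
--         prev = c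
--     return result
-- ===== Notes on version B (the rewrite author's own statement) =====
-- stated objective: idiomatic
-- what changed: Replaces A's tail recursion with an index-range for-loop (ported as a foldl over range(index, len(st))) carrying (prev, result) as loop state.
import Mathlib
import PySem

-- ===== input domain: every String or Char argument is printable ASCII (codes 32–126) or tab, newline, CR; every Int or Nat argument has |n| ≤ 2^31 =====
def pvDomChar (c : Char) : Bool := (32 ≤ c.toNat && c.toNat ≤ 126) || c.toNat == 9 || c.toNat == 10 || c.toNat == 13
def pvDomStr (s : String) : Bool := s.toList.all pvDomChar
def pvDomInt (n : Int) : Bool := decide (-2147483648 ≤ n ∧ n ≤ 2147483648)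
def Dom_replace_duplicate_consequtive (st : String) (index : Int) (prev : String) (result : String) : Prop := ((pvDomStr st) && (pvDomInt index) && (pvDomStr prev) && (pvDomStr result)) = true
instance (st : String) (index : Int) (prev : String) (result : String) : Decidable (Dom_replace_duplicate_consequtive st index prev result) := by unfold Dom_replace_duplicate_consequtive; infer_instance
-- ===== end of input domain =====

-- B replaces A's tail recursion with a for-loop over range(index, len(st)); same cost, no recursion.

-- ===== PORT A =====
-- literal transliteration of A's tail recursion on (index, prev, result);
-- the `none` branch of pyGet? is Python's IndexError (excluded by Pre_).
def pvA_go (cs : List Char) (index : Int) (prev result : List Char) : List Char :=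
  if index = (cs.length : Int) then result
  else
    match h : PySem.List.pyGet? cs index with
    | none => result   -- Python raises IndexError here; outside Pre_
    | some c =>
      let result1 := if prev = [c] then result ++ ['-'] else result
      pvA_go cs (index + 1) [c] (result1 ++ [c])
termination_by ((cs.length : Int) + 1 - index).toNat
decreasing_by
  have hin : PySem.Raise.InRange cs.length index := by
    by_contra hn
    rw [← PySem.List.pyGet?_eq_none_iff (xs := cs) (i := index)] at hn
    simp [hn] at h
  unfold PySem.Raise.InRange at hin
  omega

def replace_duplicate_consequtive (st : String) (index : Int) (prev : String) (result : String) : String :=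
  String.mk (pvA_go st.toList index prev.toList result.toList)

-- ===== PORT B =====
-- literal transliteration of B: a for-loop over range(index, len(st)) with state (prev, result)
def pvB_step (cs : List Char) (s : List Char × List Char) (i : Int) : List Char × List Char :=
  let c := PySem.List.pyGetD cs i ' '   -- total under Pre_ (every visited index is in range)
  let r := if s.1 = [c] then s.2 ++ ['-'] else s.2
  ([c], r ++ [c])

def replace_duplicate_consequtive_alt (st : String) (index : Int) (prev : String) (result : String) : String :=
  let cs := st.toList
  String.mk ((PySem.List.pyRange index (cs.length : Int) 1).foldl (pvB_step cs) (prev.toList, result.toList)).2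

-- ===== PRECONDITION & SPEC =====
-- Pre_ excludes exactly the inputs where A raises IndexError: index outside [-len(st), len(st)].
def Pre_replace_duplicate_consequtive (st : String) (index : Int) (prev : String) (result : String) : Prop :=
  -(st.toList.length : Int) ≤ index ∧ index ≤ (st.toList.length : Int)
instance (st : String) (index : Int) (prev : String) (result : String) : Decidable (Pre_replace_duplicate_consequtive st index prev result) := by unfold Pre_replace_duplicate_consequtive; infer_instance

def pvWitness_replace_duplicate_consequtive : String × Int × String × String := ("aab", 0, "", "")

def Spec_replace_duplicate_consequtive (st : String) (index : Int) (prev : String) (result : String) (out : String) : Prop := out = replace_duplicate_consequtive_alt st index prev result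
instance (st : String) (index : Int) (prev : String) (result : String) (out : String) : Decidable (Spec_replace_duplicate_consequtive st index prev result out) := by unfold Spec_replace_duplicate_consequtive; infer_instance

-- ===== CLAIM (what is proved, stated in full; the proofs are below) =====
def Claim_equal_replace_duplicate_consequtive : Prop := ∀ (st : String) (index : Int) (prev : String) (result : String), Dom_replace_duplicate_consequtive st index prev result → Pre_replace_duplicate_consequtive st index prev result → Spec_replace_duplicate_consequtive st index prev result (replace_duplicate_consequtive st index prev result)

-- ===== LEMMAS AND PROOFS =====

theorem pvA_go_eq_fold (cs : List Char) (index : Int) (prev result : List Char)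
    (h1 : -(cs.length : Int) ≤ index) (h2 : index ≤ (cs.length : Int)) :
    pvA_go cs index prev result =
    ((PySem.List.pyRange index (cs.length : Int) 1).foldl (pvB_step cs) (prev, result)).2 := by
  by_cases heq : index = (cs.length : Int)
  · subst heq
    rw [pvA_go, if_pos rfl, PySem.List.pyRange_one_eq_nil (le_refl _)]
    rfl
  · have hlt : index < (cs.length : Int) := lt_of_le_of_ne h2 heq
    have hin : PySem.Raise.InRange cs.length index := by
      unfold PySem.Raise.InRange; omega
    obtain ⟨c, hc⟩ : ∃ c, PySem.List.pyGet? cs index = some c := by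
      cases hg : PySem.List.pyGet? cs index with
      | none =>
        rw [PySem.List.pyGet?_eq_none_iff] at hg
        exact absurd hin hg
      | some c => exact ⟨c, rfl⟩
    have hd : PySem.List.pyGetD cs index ' ' = c := by
      simp [PySem.List.pyGetD, hc]
    rw [pvA_go, if_neg heq]
    rw [PySem.List.pyRange_one_cons hlt, List.foldl_cons]
    have hrec := pvA_go_eq_fold cs (index + 1) [c]
      ((if prev = [c] then result ++ ['-'] else result) ++ [c]) (by omega) (by omega)
    split
    · next hg => rw [hg] at hc; cases hc
    · next c' hg =>
      rw [hg] at hc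
      cases hc
      rw [hrec]
      simp [pvB_step, hd]
termination_by ((cs.length : Int) + 1 - index).toNat
decreasing_by omega

-- ===== VERDICT (by name: the statement is the Claim_ definition above) =====
theorem replace_duplicate_consequtive_spec : Claim_equal_replace_duplicate_consequtive := by
  intro st index prev result _ hpre
  unfold Spec_replace_duplicate_consequtive replace_duplicate_consequtive replace_duplicate_consequtive_alt
  rw [pvA_go_eq_fold st.toList index prev.toList result.toList hpre.1 hpre.2]
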